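-- pv_equiv track=rewrite | github.com/fkeppner/Hiwi | Hebelstruktur/hebelstruktur_2.py | loop_counterclock
-- ===== SOURCE A (Python) =====
-- def loop_counterclock(points, translation_dict):
--     conn = list()
--     for p in range(len(points)):
--         if p == len(points) - 1:
--             conn.append((translation_dict[points[p]], translation_dict[points[0]]))
--         else:
--             conn.append((translation_dict[points[p]], translation_dict[points[p + 1]]))
--     return conn
-- ===== SOURCE B (Python) =====
-- def loop_counterclock(points, translation_dict):
--     # Single reverse pass with a successor accumulator: walking the points
--     # backwards, each point is paired with the translated value of the point
--     # that follows it; the last point's successor is the first point.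
--     if not points:
--         return []
--     conn = []
--     nxt = translation_dict[points[0]]
--     for p in reversed(points):
--         cur = translation_dict[p]
--         conn.append((cur, nxt))
--         nxt = cur
--     conn.reverse()
--     return conn
-- ===== Notes on version B (the rewrite author's own statement) =====
-- stated objective: alternative
-- what changed: Replaced the index loop with its last-element wraparound branch by a single reverse-order pass that carries the translated successor in an accumulator, building the pairs back-to-front and reversing once (no indexing, no rotation).
import Mathlib
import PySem

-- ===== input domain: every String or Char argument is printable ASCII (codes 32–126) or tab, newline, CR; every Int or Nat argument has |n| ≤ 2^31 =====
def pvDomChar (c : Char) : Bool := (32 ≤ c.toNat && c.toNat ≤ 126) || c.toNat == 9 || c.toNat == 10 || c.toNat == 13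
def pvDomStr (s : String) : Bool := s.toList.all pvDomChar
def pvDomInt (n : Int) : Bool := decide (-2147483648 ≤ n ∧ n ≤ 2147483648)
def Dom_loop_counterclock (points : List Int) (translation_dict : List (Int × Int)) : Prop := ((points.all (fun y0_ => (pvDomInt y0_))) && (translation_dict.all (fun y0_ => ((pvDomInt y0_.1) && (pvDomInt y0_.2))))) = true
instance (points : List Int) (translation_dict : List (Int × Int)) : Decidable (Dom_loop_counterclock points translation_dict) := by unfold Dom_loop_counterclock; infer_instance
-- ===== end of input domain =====

-- B replaces the index loop and wraparound branch by one reverse pass carrying the translated successor in an accumulator (alternative decomposition; return value only).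


-- ===== PORT A =====
-- A: index loop over range(len(points)); last index wraps to points[0].
def loop_counterclock (points : List Int) (translation_dict : List (Int × Int)) : List (Int × Int) :=
  let d := PySem.Dict.ofList translation_dict
  (PySem.List.pyRange 0 (points.length : Int)).foldl
    (fun conn p =>
      if p = (points.length : Int) - 1 then
        conn ++ [(d.getD (PySem.List.pyGetD points p 0) 0, d.getD (PySem.List.pyGetD points 0 0) 0)]
      else
        conn ++ [(d.getD (PySem.List.pyGetD points p 0) 0, d.getD (PySem.List.pyGetD points (p + 1) 0) 0)]) []

-- ===== PORT B =====
-- B: walk the points in reverse carrying the translated successor (initially the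
-- translation of the first point), append pairs back-to-front, reverse once.
def loop_counterclock_alt (points : List Int) (translation_dict : List (Int × Int)) : List (Int × Int) :=
  match points with
  | [] => []
  | p0 :: _ =>
    let d := PySem.Dict.ofList translation_dict
    let st := points.reverse.foldl
      (fun (st : List (Int × Int) × Int) p =>
        let cur := d.getD p 0
        (st.1 ++ [(cur, st.2)], cur))
      ([], d.getD p0 0)
    st.1.reverse

-- ===== PRECONDITION & SPEC =====
-- Pre_ excludes exactly the inputs on which A raises KeyError: a point missing from translation_dict.
def Pre_loop_counterclock (points : List Int) (translation_dict : List (Int × Int)) : Prop :=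
  ∀ p ∈ points, p ∈ translation_dict.map Prod.fst
instance (points : List Int) (translation_dict : List (Int × Int)) : Decidable (Pre_loop_counterclock points translation_dict) := by unfold Pre_loop_counterclock; infer_instance
def pvWitness_loop_counterclock : List Int × (List (Int × Int)) := ([0, 1, 2], [(0, 10), (1, 11), (2, 12)])
def Spec_loop_counterclock (points : List Int) (translation_dict : List (Int × Int)) (out : List (Int × Int)) : Prop := out = loop_counterclock_alt points translation_dict
instance (points : List Int) (translation_dict : List (Int × Int)) (out : List (Int × Int)) : Decidable (Spec_loop_counterclock points translation_dict out) := by unfold Spec_loop_counterclock; infer_instance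

-- ===== CLAIM (what is proved, stated in full; the proofs are below) =====
def Claim_equal_loop_counterclock : Prop := ∀ (points : List Int) (translation_dict : List (Int × Int)), Dom_loop_counterclock points translation_dict → Pre_loop_counterclock points translation_dict → Spec_loop_counterclock points translation_dict (loop_counterclock points translation_dict)

-- ===== LEMMAS AND PROOFS =====

-- A's indexed map equals zip of the translated list with its rotation, for any element map f
theorem cyc_map_zip {α : Type} (f : Int → α) (points : List Int) :
    (List.range points.length).map
      (fun (k : Nat) => if (k : Int) = (points.length : Int) - 1 then
          (f (PySem.List.pyGetD points (k : Int) 0), f (PySem.List.pyGetD points 0 0))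
        else
          (f (PySem.List.pyGetD points (k : Int) 0), f (PySem.List.pyGetD points ((k : Int) + 1) 0)))
    = (points.map f).zip ((points.map f).tail ++ (points.map f).take 1) := by
  apply List.ext_getElem
  · simp [List.length_zip, List.length_tail, List.length_take]
    omega
  · intro i h1 h2
    have hi : i < points.length := by simpa using h1
    have h0 : 0 < points.length := by omega
    simp only [List.getElem_map, List.getElem_range, List.getElem_zip]
    by_cases hlast : i = points.length - 1
    · rw [if_pos (by omega : ((i : Nat) : Int) = (points.length : Int) - 1),
          PySem.List.pyGetD_eq_getElem points (i := (i : Int)) 0 (by omega) (by exact_mod_cast hi),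
          PySem.List.pyGetD_eq_getElem points (i := 0) 0 le_rfl (by exact_mod_cast h0)]
      rw [List.getElem_append_right (by simp [List.length_tail]; omega)]
      simp [hlast]
    · rw [if_neg (by omega : ¬ ((i : Nat) : Int) = (points.length : Int) - 1),
          PySem.List.pyGetD_eq_getElem points (i := (i : Int)) 0 (by omega) (by exact_mod_cast hi),
          PySem.List.pyGetD_eq_getElem points (i := (i : Int) + 1) 0 (by omega) (by omega)]
      rw [List.getElem_append_left (by simp [List.length_tail]; omega)]
      simp [List.getElem_tail]

-- B's reverse fold characterised: it builds the zip-with-successor list reversed,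
-- and its carried successor is the translation of the head (or the initial n).
theorem revfold_char {α : Type} (f : Int → α) (xs : List Int) (n : α) :
    xs.reverse.foldl
      (fun (st : List (α × α) × α) p => ((f p, st.2) :: st.1, f p)) ([], n)
    = ((xs.map f).zip ((xs.map f).tail ++ [n]), (xs.map f).headD n) := by
  induction xs generalizing n with
  | nil => simp
  | cons y ys ih =>
    cases ys with
    | nil => simp
    | cons z zs =>
      rw [List.reverse_cons, List.foldl_append, ih n]
      simp

theorem loop_counterclock_eq_alt (points : List Int) (translation_dict : List (Int × Int)) :
    loop_counterclock points translation_dict = loop_counterclock_alt points translation_dict := by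
  cases points with
  | nil => rfl
  | cons p0 ps =>
    set f : Int → Int := fun x => (PySem.Dict.ofList translation_dict).getD x 0 with hf
    -- A side: foldl over pyRange to map over range, then the zip characterisation
    have hA : loop_counterclock (p0 :: ps) translation_dict
        = ((p0 :: ps).map f).zip (((p0 :: ps).map f).tail ++ ((p0 :: ps).map f).take 1) := by
      simp only [loop_counterclock]
      have hfun : (fun (conn : List (Int × Int)) (p : Int) =>
          if p = (((p0 :: ps).length : Nat) : Int) - 1 then
            conn ++ [(f (PySem.List.pyGetD (p0 :: ps) p 0), f (PySem.List.pyGetD (p0 :: ps) 0 0))]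
          else
            conn ++ [(f (PySem.List.pyGetD (p0 :: ps) p 0), f (PySem.List.pyGetD (p0 :: ps) (p + 1) 0))])
          = (fun conn p => conn ++ [if p = (((p0 :: ps).length : Nat) : Int) - 1 then
                (f (PySem.List.pyGetD (p0 :: ps) p 0), f (PySem.List.pyGetD (p0 :: ps) 0 0))
              else
                (f (PySem.List.pyGetD (p0 :: ps) p 0), f (PySem.List.pyGetD (p0 :: ps) (p + 1) 0))]) := by
        funext conn p; split <;> rfl
      rw [hfun, PySem.List.pyRange_zero_natCast, PySem.List.foldl_append_singleton_eq_map,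
          List.map_map, List.nil_append]
      exact cyc_map_zip f (p0 :: ps)
    -- B side: the append-singleton fold's list equals the cons fold's list, reversed
    have hrel : ∀ (l : List Int) (acc1 acc2 : List (Int × Int)) (n : Int),
        acc1 = acc2.reverse →
        (l.foldl (fun (st : List (Int × Int) × Int) p => (st.1 ++ [(f p, st.2)], f p)) (acc1, n)).1
          = (l.foldl (fun (st : List (Int × Int) × Int) p => ((f p, st.2) :: st.1, f p)) (acc2, n)).1.reverse
        ∧ (l.foldl (fun (st : List (Int × Int) × Int) p => (st.1 ++ [(f p, st.2)], f p)) (acc1, n)).2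
          = (l.foldl (fun (st : List (Int × Int) × Int) p => ((f p, st.2) :: st.1, f p)) (acc2, n)).2 := by
      intro l
      induction l with
      | nil => intro acc1 acc2 n h; simpa using h
      | cons x xs ih =>
        intro acc1 acc2 n h
        simpa using ih (acc1 ++ [(f x, n)]) ((f x, n) :: acc2) (f x) (by simp [h])
    have hB : loop_counterclock_alt (p0 :: ps) translation_dict
        = ((p0 :: ps).map f).zip (((p0 :: ps).map f).tail ++ [f p0]) := by
      simp only [loop_counterclock_alt]
      rw [(hrel ((p0 :: ps).reverse) [] [] (f p0) rfl).1, List.reverse_reverse,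
          revfold_char f (p0 :: ps) (f p0)]
    rw [hA, hB]
    simp

-- ===== VERDICT (by name: the statement is the Claim_ definition above) =====
theorem loop_counterclock_spec : Claim_equal_loop_counterclock := by
  intro points td _ _
  unfold Spec_loop_counterclock
  exact loop_counterclock_eq_alt points td
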